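-- pv_equiv track=rewrite | github.com/JeffreyGbeho/leetcode-solutions | 1940-MaximumXorForEachQuery/1940-MaximumXorForEachQuery.py | getMaximumXor
-- ===== SOURCE A (Python) =====
-- def getMaximumXor(nums, maximumBit):
--     n = len(nums)
--     ans = [0] * n
--     val = (1 << maximumBit) - 1  # Equivalent to 2^maximumBit - 1
--
--     curr = 0
--     for num in nums:
--         curr ^= num
--
--     for i in range(n):
--         ans[i] = curr ^ val
--         curr ^= nums[n - 1 - i]
--
--     return ans
-- ===== SOURCE B (Python) =====
-- def getMaximumXor(nums, maximumBit):
--     # Single forward scan: the answer to query i is val ^ (XOR of the first n-i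
--     # elements), so emitting val ^ running-xor after every element produces the
--     # answer list back-to-front; one in-place reversal finishes the job.
--     val = (1 << maximumBit) - 1
--     acc = 0
--     out = []
--     for x in nums:
--         acc ^= x
--         out.append(acc ^ val)
--     out.reverse()
--     return out
-- ===== Notes on version B (the rewrite author's own statement) =====
-- stated objective: simpler
-- what changed: A traverses nums twice (one pass to accumulate the total XOR, then a second reverse-indexed pass that undoes it element by element into a preallocated ans array); B traverses nums exactly once, emitting val^running-xor as it goes, and reverses the output list in place, so the backward indexing pass and the XOR-cancellation step disappear.
import Mathlib
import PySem

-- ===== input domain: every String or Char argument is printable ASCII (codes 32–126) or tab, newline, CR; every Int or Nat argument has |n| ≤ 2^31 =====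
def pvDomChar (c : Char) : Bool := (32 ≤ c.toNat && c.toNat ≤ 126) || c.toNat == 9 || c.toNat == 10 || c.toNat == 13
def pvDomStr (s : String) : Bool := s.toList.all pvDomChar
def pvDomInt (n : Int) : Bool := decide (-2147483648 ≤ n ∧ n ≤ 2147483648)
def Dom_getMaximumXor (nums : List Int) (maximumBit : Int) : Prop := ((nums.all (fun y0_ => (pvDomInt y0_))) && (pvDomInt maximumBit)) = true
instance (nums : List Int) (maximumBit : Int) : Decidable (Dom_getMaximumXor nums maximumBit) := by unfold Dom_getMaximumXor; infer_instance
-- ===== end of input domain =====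

-- B replaces A's two passes over nums (total XOR, then a reverse-indexed pass undoing it)
-- by one forward pass emitting the answers back-to-front plus an in-place reversal (simpler).

-- ===== PORT A =====
def getMaximumXor (nums : List Int) (maximumBit : Int) : List Int :=
  let n : Int := nums.length
  let val : Int := (1 <<< maximumBit.toNat) - 1
  let curr : Int := nums.foldl (fun c num => PySem.Int.bxor c num) 0
  -- for i in range(n): ans[i] = curr ^ val; curr ^= nums[n - 1 - i]
  ((PySem.List.pyRange 0 n 1).foldl
    (fun (st : List Int × Int) i =>
      (st.1 ++ [PySem.Int.bxor st.2 val],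
       PySem.Int.bxor st.2 (PySem.List.pyGetD nums (n - 1 - i) 0)))
    ([], curr)).1

-- ===== PORT B =====
def getMaximumXor_alt (nums : List Int) (maximumBit : Int) : List Int :=
  let val : Int := (1 <<< maximumBit.toNat) - 1
  -- acc = 0; out = []; for x in nums: acc ^= x; out.append(acc ^ val)
  let st : List Int × Int :=
    nums.foldl
      (fun (st : List Int × Int) x =>
        let acc := PySem.Int.bxor st.2 x
        (st.1 ++ [PySem.Int.bxor acc val], acc))
      ([], 0)
  st.1.reverse

-- ===== PRECONDITION & SPEC =====
-- Pre_ excludes exactly maximumBit < 0, where Python's '1 << maximumBit' raises ValueError (in both A and B).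
def Pre_getMaximumXor (nums : List Int) (maximumBit : Int) : Prop := 0 ≤ maximumBit
instance (nums : List Int) (maximumBit : Int) : Decidable (Pre_getMaximumXor nums maximumBit) := by unfold Pre_getMaximumXor; infer_instance

def pvWitness_getMaximumXor : List Int × Int := ([0, 1, 1, 3], 2)

def Spec_getMaximumXor (nums : List Int) (maximumBit : Int) (out : List Int) : Prop := out = getMaximumXor_alt nums maximumBit
instance (nums : List Int) (maximumBit : Int) (out : List Int) : Decidable (Spec_getMaximumXor nums maximumBit out) := by unfold Spec_getMaximumXor; infer_instance

-- ===== CLAIM (what is proved, stated in full; the proofs are below) =====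
def Claim_equal_getMaximumXor : Prop := ∀ (nums : List Int) (maximumBit : Int), Dom_getMaximumXor nums maximumBit → Pre_getMaximumXor nums maximumBit → Spec_getMaximumXor nums maximumBit (getMaximumXor nums maximumBit)

-- ===== LEMMAS AND PROOFS =====

-- XOR of the first k elements of nums (the value both programs track).
def Pfx (nums : List Int) (k : Nat) : Int := (nums.take k).foldl PySem.Int.bxor 0

theorem bxor_eq_xor (a b : Int) : PySem.Int.bxor a b = Int.xor a b := by
  unfold PySem.Int.bxor Int.xor
  rcases a with m | m <;> rcases b with n | n <;> simp <;> omega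

theorem bxor_cancel (a b : Int) : PySem.Int.bxor (PySem.Int.bxor a b) b = a := by
  rw [bxor_eq_xor, bxor_eq_xor]
  rcases a with m | m <;> rcases b with n | n <;>
    simp [Int.xor, Nat.xor_xor_cancel_right]

theorem Pfx_succ (nums : List Int) (j : Nat) (h : j < nums.length) :
    Pfx nums (j + 1) = PySem.Int.bxor (Pfx nums j) nums[j] := by
  unfold Pfx
  rw [List.take_succ_eq_append_getElem h, List.foldl_append]
  rfl

-- A's second loop, unwound: after m steps the list holds val ^ Pfx (n-k) for k < m.
theorem loopA (nums : List Int) (val : Int) (m : Nat) (hm : m ≤ nums.length) :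
    ((List.range m).foldl
      (fun (st : List Int × Int) (k : Nat) =>
        (st.1 ++ [PySem.Int.bxor st.2 val],
         PySem.Int.bxor st.2 (PySem.List.pyGetD nums ((nums.length : Int) - 1 - (k : Int)) 0)))
      ([], Pfx nums nums.length))
    = ((List.range m).map (fun k => PySem.Int.bxor (Pfx nums (nums.length - k)) val),
       Pfx nums (nums.length - m)) := by
  induction m with
  | zero => simp
  | succ m ih =>
    have hm' : m ≤ nums.length := Nat.le_of_succ_le hm
    rw [List.range_succ, List.foldl_append, List.map_append, ih hm']
    simp only [List.foldl_cons, List.foldl_nil, List.map_cons, List.map_nil]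
    have hidx : (nums.length : Int) - 1 - (m : Int) = ((nums.length - 1 - m : Nat) : Int) := by
      omega
    have hget : PySem.List.pyGetD nums ((nums.length : Int) - 1 - (m : Int)) 0
        = nums[nums.length - 1 - m]'(by omega) := by
      rw [hidx, PySem.List.pyGetD_natCast]
      exact List.getD_eq_getElem _ _ (by omega)
    have hstep : PySem.Int.bxor (Pfx nums (nums.length - m)) (nums[nums.length - 1 - m]'(by omega))
        = Pfx nums (nums.length - (m+1)) := by
      have h1 : nums.length - m = (nums.length - 1 - m) + 1 := by omega
      rw [h1, Pfx_succ nums (nums.length - 1 - m) (by omega), bxor_cancel]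
      congr 1
      omega
    rw [hget, hstep]

-- B's single forward loop: it emits val ^ Pfx (k+1) in order of k.
theorem loopB (nums : List Int) (val : Int) :
    nums.foldl
      (fun (st : List Int × Int) x =>
        let acc := PySem.Int.bxor st.2 x
        (st.1 ++ [PySem.Int.bxor acc val], acc))
      ([], 0)
    = ((List.range nums.length).map (fun k => PySem.Int.bxor (Pfx nums (k + 1)) val),
       Pfx nums nums.length) := by
  induction nums using List.reverseRecOn with
  | nil => simp [Pfx]
  | append_singleton xs x ih =>
    rw [List.foldl_append, ih]
    simp only [List.foldl_cons, List.foldl_nil, List.length_append, List.length_singleton,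
      List.range_succ, List.map_append, List.map_cons, List.map_nil]
    have hPfx_agree : ∀ k : Nat, k ≤ xs.length → Pfx (xs ++ [x]) k = Pfx xs k := by
      intro k hk
      unfold Pfx
      rw [List.take_append_of_le_length hk]
    have hlast : Pfx (xs ++ [x]) (xs.length + 1) = PySem.Int.bxor (Pfx xs xs.length) x := by
      rw [Pfx_succ (xs ++ [x]) xs.length (by simp), hPfx_agree xs.length le_rfl]
      simp
    refine Prod.ext ?_ ?_
    · simp only []
      rw [hlast]
      congr 1
      apply List.map_congr_left
      intro k hk
      rw [hPfx_agree (k + 1) (List.mem_range.mp hk)]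
    · simp only []
      exact hlast.symm

theorem main_eq (nums : List Int) (maximumBit : Int) :
    getMaximumXor nums maximumBit = getMaximumXor_alt nums maximumBit := by
  unfold getMaximumXor getMaximumXor_alt
  simp only []
  set val : Int := (1 <<< maximumBit.toNat) - 1 with hval
  have hcurr : nums.foldl (fun c num => PySem.Int.bxor c num) 0 = Pfx nums nums.length := by
    unfold Pfx; rw [List.take_length]
  rw [hcurr, PySem.List.pyRange_zero_natCast, List.foldl_map,
      loopA nums val nums.length le_rfl, loopB nums val]
  -- both sides are maps over range nums.length; compare pointwise
  apply List.ext_getElem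
  · simp
  · intro i h1 h2
    simp only [List.getElem_map, List.getElem_range, List.getElem_reverse] at *
    have hlen : i < nums.length := by simpa using h1
    simp only [List.length_map, List.length_range] at h2 ⊢
    congr 2
    omega

-- ===== VERDICT (by name: the statement is the Claim_ definition above) =====
theorem getMaximumXor_spec : Claim_equal_getMaximumXor := by
  intro nums maximumBit _ _
  unfold Spec_getMaximumXor
  exact main_eq nums maximumBit
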